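-- pv_equiv track=rewrite | github.com/PranavReddyP16/Advent-of-Code-2022 | Day2/second.py | get_move_from_result
-- ===== SOURCE A (Python) =====
-- def get_move_from_result(opponent_move, result):
--     key_wins_over_value_dict = {
--         'B': 'A',
--         'C': 'B',
--         'A': 'C',
--     }
--
--     if result == 'X':
--         your_move = key_wins_over_value_dict[opponent_move]
--     elif result == 'Y':
--         your_move = opponent_move
--     else:
--         value_loses_over_key_dict = {v: k for k, v in key_wins_over_value_dict.items()}
--         your_move = value_loses_over_key_dict[opponent_move]
--
--     return your_move
-- ===== SOURCE B (Python) =====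
-- BEATS = {('A', 'C'), ('B', 'A'), ('C', 'B')}  # (winner, loser) pairs
--
-- def get_move_from_result(opponent_move, result):
--     if result == 'Y':
--         return opponent_move
--     for candidate in 'ABC':
--         pair = (opponent_move, candidate) if result == 'X' else (candidate, opponent_move)
--         if pair in BEATS:
--             return candidate
-- ===== Notes on version B (the rewrite author's own statement) =====
-- stated objective: alternative
-- what changed: Replaces A's direct dictionary lookups (and the inverted dict built by comprehension) with a generate-and-test search: a single 'beats' relation of (winner, loser) pairs and a scan over the three candidate moves returning the first candidate standing in the required relation to the opponent's move.
import Mathlib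
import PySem

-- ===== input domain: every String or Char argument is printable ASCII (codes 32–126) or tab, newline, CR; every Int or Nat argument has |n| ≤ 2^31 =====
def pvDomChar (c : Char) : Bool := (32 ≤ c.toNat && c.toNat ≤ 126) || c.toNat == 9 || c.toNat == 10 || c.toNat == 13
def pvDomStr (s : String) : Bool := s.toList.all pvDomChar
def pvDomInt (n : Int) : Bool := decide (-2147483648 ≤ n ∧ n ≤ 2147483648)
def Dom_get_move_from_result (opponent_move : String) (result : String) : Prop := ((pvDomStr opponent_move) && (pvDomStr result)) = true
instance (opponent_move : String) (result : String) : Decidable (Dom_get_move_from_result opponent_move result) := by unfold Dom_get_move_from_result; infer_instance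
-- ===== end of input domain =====

-- B replaces A's two mapping dicts with a generate-and-test search over the three candidate moves
-- against a single 'beats' relation (alternative decomposition; same cost).

-- ===== PORT A =====
-- A's dict lookup raises KeyError on a missing key; Pre_ excludes those inputs, so the port's .getD "" default is never reached there.
def get_move_from_result (opponent_move : String) (result : String) : String :=
  let key_wins_over_value_dict : PySem.Dict String String :=
    (((PySem.Dict.empty).insert "B" "A").insert "C" "B").insert "A" "C"
  if result = "X" then
    (key_wins_over_value_dict.get? opponent_move).getD ""
  else if result = "Y" then
    opponent_move
  else
    let value_loses_over_key_dict : PySem.Dict String String :=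
      key_wins_over_value_dict.items.foldl (fun d kv => d.insert kv.2 kv.1) PySem.Dict.empty
    (value_loses_over_key_dict.get? opponent_move).getD ""

-- ===== PORT B =====
-- B's BEATS set of (winner, loser) pairs; in Python a set literal, here its distinct elements.
def pvBeats : PySem.Set (String × String) :=
  PySem.Set.ofList [("A", "C"), ("B", "A"), ("C", "B")]

-- Python B falls off the for-loop (returning None, not a String) when no candidate matches;
-- Pre_ excludes those inputs, so the port's "" default for the empty result is never reached there.
def get_move_from_result_alt (opponent_move : String) (result : String) : String :=
  if result = "Y" then
    opponent_move
  else
    -- for-loop with early return = fold keeping the first found candidate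
    let found : Option String := ["A", "B", "C"].foldl
      (fun acc candidate =>
        match acc with
        | some _ => acc
        | none =>
          let pair := if result = "X" then (opponent_move, candidate) else (candidate, opponent_move)
          if pair ∈ pvBeats then some candidate else none)
      none
    found.getD ""

-- ===== PRECONDITION & SPEC =====
-- Pre_ excludes exactly the inputs where A raises KeyError: a non-'Y' result with an opponent move outside {'A','B','C'}.
def Pre_get_move_from_result (opponent_move : String) (result : String) : Prop :=
  result = "Y" ∨ opponent_move = "A" ∨ opponent_move = "B" ∨ opponent_move = "C"
instance (opponent_move : String) (result : String) : Decidable (Pre_get_move_from_result opponent_move result) := by unfold Pre_get_move_from_result; infer_instance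

def pvWitness_get_move_from_result : String × String := ("A", "X")

def Spec_get_move_from_result (opponent_move : String) (result : String) (out : String) : Prop := out = get_move_from_result_alt opponent_move result
instance (opponent_move : String) (result : String) (out : String) : Decidable (Spec_get_move_from_result opponent_move result out) := by unfold Spec_get_move_from_result; infer_instance

-- ===== CLAIM (what is proved, stated in full; the proofs are below) =====
def Claim_equal_get_move_from_result : Prop := ∀ (opponent_move : String) (result : String), Dom_get_move_from_result opponent_move result → Pre_get_move_from_result opponent_move result → Spec_get_move_from_result opponent_move result (get_move_from_result opponent_move result)

-- ===== LEMMAS AND PROOFS =====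

-- ===== VERDICT (by name: the statement is the Claim_ definition above) =====
theorem get_move_from_result_spec : Claim_equal_get_move_from_result := by
  intro m r _ hpre
  unfold Spec_get_move_from_result
  by_cases hY : r = "Y"
  · simp [get_move_from_result, get_move_from_result_alt, hY]
  · rcases hpre with h | h | h | h
    · exact absurd h hY
    all_goals subst h
    all_goals by_cases hX : r = "X"
    all_goals simp [get_move_from_result, get_move_from_result_alt, hX, hY, pvBeats,
      PySem.Dict.get?, PySem.Dict.insert, PySem.Dict.empty,
      PySem.Set.ofList, PySem.Set.add, List.foldl]
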